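-- pv_equiv track=rewrite | github.com/fulaibaowang/RAG-scripts | evidence/snippet_rerank.py | _chunk_ce_items
-- ===== SOURCE A (Python) =====
-- import math
-- from typing import Dict, List, Optional, Sequence, Tuple
--
-- def _chunk_ce_items(
--     items: List[Tuple[str, List[Tuple[str, int, str]]]],
--     n: int,
-- ) -> List[List[Tuple[str, List[Tuple[str, int, str]]]]]:
--     """Split (qid, win_list) items into n chunks for multi-GPU."""
--     if n <= 1:
--         return [items]
--     chunk_size = max(1, math.ceil(len(items) / n))
--     return [
--         items[i * chunk_size : (i + 1) * chunk_size]
--         for i in range(n)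
--         if items[i * chunk_size : (i + 1) * chunk_size]
--     ]
-- ===== SOURCE B (Python) =====
-- import math
-- from typing import Dict, List, Optional, Sequence, Tuple
--
-- def _chunk_ce_items(
--     items: List[Tuple[str, List[Tuple[str, int, str]]]],
--     n: int,
-- ) -> List[List[Tuple[str, List[Tuple[str, int, str]]]]]:
--     """Split (qid, win_list) items into n chunks for multi-GPU."""
--     if n <= 1:
--         return [items]
--     chunk_size = max(1, math.ceil(len(items) / n))
--     result = []
--     for idx, item in enumerate(items):
--         if idx % chunk_size == 0:
--             result.append([])
--         result[-1].append(item)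
--     return result
-- ===== Notes on version B (the rewrite author's own statement) =====
-- stated objective: faster
-- what changed: Replaces the per-chunk-index slicing comprehension (one slice per i in range(n), empty slices filtered out) by a single element-wise pass that opens a fresh bucket whenever idx % chunk_size == 0 and appends each item to the current bucket.
import Mathlib
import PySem

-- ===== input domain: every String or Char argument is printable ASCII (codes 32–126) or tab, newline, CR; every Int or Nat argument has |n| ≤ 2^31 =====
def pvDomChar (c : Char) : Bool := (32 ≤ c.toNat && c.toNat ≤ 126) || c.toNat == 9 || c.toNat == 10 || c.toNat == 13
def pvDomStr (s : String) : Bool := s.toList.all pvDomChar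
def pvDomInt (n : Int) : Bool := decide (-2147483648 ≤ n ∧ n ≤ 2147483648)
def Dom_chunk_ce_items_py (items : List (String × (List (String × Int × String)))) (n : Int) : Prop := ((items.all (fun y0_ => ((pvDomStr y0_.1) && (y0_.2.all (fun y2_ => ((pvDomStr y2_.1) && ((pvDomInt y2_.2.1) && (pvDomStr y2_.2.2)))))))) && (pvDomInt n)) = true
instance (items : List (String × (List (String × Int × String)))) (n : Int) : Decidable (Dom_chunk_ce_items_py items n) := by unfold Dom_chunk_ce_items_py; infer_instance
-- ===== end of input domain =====

-- B replaces A's per-chunk-index slicing comprehension by a single element-wise pass that opens a bucket whenever idx % chunk_size == 0 (objective: alternative decomposition).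

-- ===== PORT A =====
-- math.ceil(len(items)/n) ported as the exact integer ceiling -((-len)//n); exact here since
-- a real list length is far below 2^52, where float division could perturb the ceiling.
def chunk_ce_items_py (items : List (String × (List (String × Int × String)))) (n : Int) : List (List (String × (List (String × Int × String)))) :=
  if n ≤ 1 then [items]
  else
    let cs : Int := max 1 (-(PySem.Int.floordiv (-(items.length : Int)) n))
    -- [items[i*cs:(i+1)*cs] for i in range(n) if items[i*cs:(i+1)*cs]]
    (PySem.List.pyRange 0 n 1).foldl
      (fun acc i =>
        if PySem.List.slice items (some (i * cs)) (some ((i + 1) * cs)) ≠ [] then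
          acc ++ [PySem.List.slice items (some (i * cs)) (some ((i + 1) * cs))]
        else acc) []

-- ===== PORT B =====
-- The loop body of B: if idx % chunk_size == 0: result.append([]); result[-1].append(item).
-- result[-1].append(item) replaces the last bucket; whenever it runs, result is nonempty
-- (idx = 0 opened a bucket first), so getLast?.getD [] is exact on every reachable state.
def pvStep {α : Type} (cs : Int) (result : List (List α)) (p : Int × α) : List (List α) :=
  let result := if PySem.Int.mod p.1 cs == 0 then result ++ [[]] else result
  result.dropLast ++ [(result.getLast?.getD []) ++ [p.2]]

def chunk_ce_items_py_alt (items : List (String × (List (String × Int × String)))) (n : Int) : List (List (String × (List (String × Int × String)))) :=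
  if n ≤ 1 then [items]
  else
    let cs : Int := max 1 (-(PySem.Int.floordiv (-(items.length : Int)) n))
    (PySem.List.enumerate items 0).foldl (pvStep cs) []

-- ===== PRECONDITION & SPEC =====
def Spec_chunk_ce_items_py (items : List (String × (List (String × Int × String)))) (n : Int) (out : List (List (String × (List (String × Int × String))))) : Prop := out = chunk_ce_items_py_alt items n
instance (items : List (String × (List (String × Int × String)))) (n : Int) (out : List (List (String × (List (String × Int × String))))) : Decidable (Spec_chunk_ce_items_py items n out) := by unfold Spec_chunk_ce_items_py; infer_instance

-- ===== CLAIM (what is proved, stated in full; the proofs are below) =====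
def Claim_equal_chunk_ce_items_py : Prop := ∀ (items : List (String × (List (String × Int × String)))) (n : Int), Dom_chunk_ce_items_py items n → Spec_chunk_ce_items_py items n (chunk_ce_items_py items n)

-- ===== LEMMAS AND PROOFS =====

-- Common reference form: chunks of size cs, first to last.
def pvChunksOf {α : Type} (cs : Nat) (l : List α) : List (List α) :=
  if _h : l = [] ∨ cs = 0 then [] else l.take cs :: pvChunksOf cs (l.drop cs)
termination_by l.length
decreasing_by
  rcases l with _ | ⟨x, t⟩
  · simp at _h
  · push_neg at _h
    simp only [List.length_drop, List.length_cons]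
    omega

theorem pv_chunksOf_nil {α : Type} (cs : Nat) : pvChunksOf cs ([] : List α) = [] := by
  rw [pvChunksOf]; simp

theorem pv_foldl_id {α β : Type} (l : List β) (a : α) : l.foldl (fun a _ => a) a = a := by
  induction l generalizing a with
  | nil => rfl
  | cons x xs ih => simp only [List.foldl_cons]; exact ih a

-- A's fold over range m of slices (Nat form) equals pvChunksOf.
theorem pv_fold_slices {α : Type} (cs : Nat) (hcs : 1 ≤ cs) :
    ∀ (m : Nat) (l : List α) (acc : List (List α)), l.length ≤ m * cs →
    (List.range m).foldl
      (fun acc k => if (l.drop (k * cs)).take cs ≠ [] then acc ++ [(l.drop (k * cs)).take cs] else acc)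
      acc = acc ++ pvChunksOf cs l := by
  intro m
  induction m with
  | zero =>
    intro l acc h
    have hnil : l = [] := List.eq_nil_of_length_eq_zero (by omega)
    subst hnil
    simp [pv_chunksOf_nil]
  | succ m ih =>
    intro l acc h
    by_cases hl : l = []
    · subst hl
      have hfn : (fun (acc : List (List α)) (k : Nat) =>
          if (List.drop (k * cs) ([] : List α)).take cs ≠ [] then
            acc ++ [(List.drop (k * cs) ([] : List α)).take cs] else acc)
          = fun (acc : List (List α)) (_ : Nat) => acc := by
        funext a k
        simp
      rw [hfn, pv_foldl_id, pv_chunksOf_nil, List.append_nil]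
    · rw [List.range_succ_eq_map]
      simp only [List.foldl_cons, List.foldl_map, Nat.zero_mul, List.drop_zero]
      have hhead : l.take cs ≠ [] := by
        simp only [ne_eq, List.take_eq_nil_iff]
        push_neg
        exact ⟨by omega, hl⟩
      rw [if_pos hhead]
      have hfold :
          (List.range m).foldl
            (fun acc k => if (l.drop (Nat.succ k * cs)).take cs ≠ [] then acc ++ [(l.drop (Nat.succ k * cs)).take cs] else acc)
            (acc ++ [l.take cs])
          = (List.range m).foldl
            (fun acc k => if ((l.drop cs).drop (k * cs)).take cs ≠ [] then acc ++ [((l.drop cs).drop (k * cs)).take cs] else acc)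
            (acc ++ [l.take cs]) := by
        congr 1
        funext a k
        have h1 : (l.drop cs).drop (k * cs) = l.drop (Nat.succ k * cs) := by
          rw [List.drop_drop]
          congr 1
          simp only [Nat.succ_eq_add_one]
          ring
        rw [h1]
      rw [hfold, ih (l.drop cs) (acc ++ [l.take cs]) (by
        simp only [List.length_drop]
        have hh : (m + 1) * cs = m * cs + cs := by ring
        omega)]
      have hcond : ¬(l = [] ∨ cs = 0) := by push_neg; exact ⟨hl, by omega⟩
      conv_rhs => rw [pvChunksOf]
      rw [dif_neg hcond]
      simp

-- B's step only depends on the index modulo cs.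
theorem pv_step_shift {α : Type} (cs : Int) (hcs : 1 ≤ cs) (s : Int) (x : α) (acc : List (List α)) :
    pvStep cs acc (s + cs, x) = pvStep cs acc (s, x) := by
  have hm : PySem.Int.mod (s + cs) cs = PySem.Int.mod s cs := by
    rw [PySem.Int.mod_eq_emod_of_pos (by omega), PySem.Int.mod_eq_emod_of_pos (by omega),
      Int.add_emod_right]
  simp only [pvStep, hm]

theorem pv_fold_shift {α : Type} (cs : Int) (hcs : 1 ≤ cs) :
    ∀ (l : List α) (s : Int) (acc : List (List α)),
    (PySem.List.enumerate l (s + cs)).foldl (pvStep cs) acc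
      = (PySem.List.enumerate l s).foldl (pvStep cs) acc := by
  intro l
  induction l with
  | nil => intro s acc; simp [PySem.List.enumerate_nil]
  | cons x xs ih =>
    intro s acc
    simp only [PySem.List.enumerate_cons, List.foldl_cons]
    rw [pv_step_shift cs hcs s x acc]
    have h1 : s + cs + 1 = (s + 1) + cs := by ring
    rw [h1]
    exact ih (s + 1) _

-- Filling the current bucket: indices j, j+1, …, all strictly between 0 and cs.
theorem pv_fold_fill {α : Type} (cs : Int) :
    ∀ (l : List α) (j : Int) (acc : List (List α)) (b : List α),
    1 ≤ j → j + l.length ≤ cs →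
    (PySem.List.enumerate l j).foldl (pvStep cs) (acc ++ [b]) = acc ++ [b ++ l] := by
  intro l
  induction l with
  | nil => intro j acc b _ _; simp [PySem.List.enumerate_nil]
  | cons x xs ih =>
    intro j acc b h1 h2
    simp only [List.length_cons] at h2
    have hj : j < cs := by push_cast at h2; omega
    have hmod : (PySem.Int.mod j cs == 0) = false := by
      rw [PySem.Int.mod_eq_emod_of_pos (by omega)]
      have he : j % cs = j := Int.emod_eq_of_lt (by omega) hj
      rw [he]
      simp only [beq_eq_false_iff_ne, ne_eq]
      omega
    simp only [PySem.List.enumerate_cons, List.foldl_cons]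
    have hstep : pvStep cs (acc ++ [b]) (j, x) = acc ++ [b ++ [x]] := by
      simp [pvStep, hmod, List.dropLast_concat]
    rw [hstep]
    have hrec := ih (j + 1) acc (b ++ [x]) (by omega) (by push_cast at h2 ⊢; omega)
    rw [hrec]
    simp

-- B's single pass equals pvChunksOf.
theorem pv_fold_enum {α : Type} (cs : Int) (hcs : 1 ≤ cs) :
    ∀ (l : List α) (acc : List (List α)),
    (PySem.List.enumerate l 0).foldl (pvStep cs) acc = acc ++ pvChunksOf cs.toNat l := by
  have hc0 : (cs.toNat : Int) = cs := Int.toNat_of_nonneg (by omega)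
  obtain ⟨c', hc'⟩ : ∃ c', cs.toNat = c' + 1 := ⟨cs.toNat - 1, by omega⟩
  suffices H : ∀ (m : Nat) (l : List α), l.length ≤ m → ∀ acc,
      (PySem.List.enumerate l 0).foldl (pvStep cs) acc = acc ++ pvChunksOf cs.toNat l by
    intro l acc; exact H l.length l le_rfl acc
  intro m
  induction m with
  | zero =>
    intro l hlen acc
    have hnil : l = [] := List.eq_nil_of_length_eq_zero (by omega)
    subst hnil
    simp [PySem.List.enumerate_nil, pv_chunksOf_nil]
  | succ m ih =>
    intro l hlen acc
    rcases l with _ | ⟨x, xs⟩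
    · simp [PySem.List.enumerate_nil, pv_chunksOf_nil]
    · simp only [List.length_cons] at hlen
      simp only [PySem.List.enumerate_cons, List.foldl_cons, zero_add]
      have hmod0 : (PySem.Int.mod 0 cs == 0) = true := by
        rw [PySem.Int.mod_eq_emod_of_pos (by omega)]
        simp
      have hstep0 : pvStep cs acc (0, x) = acc ++ [[x]] := by
        simp [pvStep, hmod0]
      rw [hstep0]
      have hsplit : xs = xs.take c' ++ xs.drop c' := (List.take_append_drop c' xs).symm
      rw [hsplit, PySem.List.enumerate_append, List.foldl_append]
      have hfill : (PySem.List.enumerate (xs.take c') 1).foldl (pvStep cs) (acc ++ [[x]])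
          = acc ++ [[x] ++ xs.take c'] := by
        apply pv_fold_fill
        · omega
        · have hlt : (xs.take c').length ≤ c' := by simp [List.length_take]
          have : ((c' + 1 : Nat) : Int) = cs := by rw [← hc']; exact hc0
          push_cast at this ⊢
          omega
      rw [hfill]
      by_cases hr : xs.drop c' = []
      · rw [hr]
        simp only [PySem.List.enumerate_nil, List.foldl_nil]
        rw [hc']
        conv_rhs => rw [pvChunksOf]
        rw [dif_neg (by simp)]
        have h1 : ((xs.take c' ++ ([] : List α))).take c' = xs.take c' := by
          simp [List.take_take]
        have h2 : ((xs.take c' ++ ([] : List α))).drop c' = [] := by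
          simp only [List.append_nil]
          exact List.drop_eq_nil_of_le (by simp [List.length_take])
        rw [List.take_succ_cons, List.drop_succ_cons, h1, h2, pv_chunksOf_nil]
        simp
      · have hxs : c' ≤ xs.length := by
          by_contra hlt
          push_neg at hlt
          exact hr (List.drop_eq_nil_of_le (by omega))
        have hlen' : (xs.take c').length = c' := by
          simp [List.length_take]
          omega
        have hidx : (1 : Int) + ((xs.take c').length : Int) = 0 + cs := by
          rw [hlen']
          have : ((c' + 1 : Nat) : Int) = cs := by rw [← hc']; exact hc0
          push_cast at this ⊢
          omega
        rw [hidx, pv_fold_shift cs hcs]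
        rw [ih (xs.drop c') (by simp only [List.length_drop]; omega) (acc ++ [[x] ++ xs.take c'])]
        rw [hc']
        conv_rhs => rw [pvChunksOf]
        rw [dif_neg (by simp)]
        have h1 : (xs.take c' ++ xs.drop c').take c' = xs.take c' := by
          rw [List.take_append_drop]
        have h2 : (xs.take c' ++ xs.drop c').drop c' = xs.drop c' := by
          rw [List.take_append_drop]
        rw [List.take_succ_cons, List.drop_succ_cons, h1, h2]
        simp

-- ===== VERDICT (by name: the statement is the Claim_ definition above) =====
theorem chunk_ce_items_py_spec : Claim_equal_chunk_ce_items_py := by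
  intro items n _hdom
  unfold Spec_chunk_ce_items_py
  by_cases hn : n ≤ 1
  · simp [chunk_ce_items_py, chunk_ce_items_py_alt, hn]
  · simp only [chunk_ce_items_py, chunk_ce_items_py_alt, if_neg hn]
    push_neg at hn
    set cs : Int := max 1 (-(PySem.Int.floordiv (-(items.length : Int)) n)) with hcsdef
    have hcs1 : 1 ≤ cs := le_max_left _ _
    have hc0 : (cs.toNat : Int) = cs := Int.toNat_of_nonneg (by omega)
    have hle : (items.length : Int) ≤ (-(PySem.Int.floordiv (-(items.length : Int)) n)) * n :=
      ((PySem.Int.neg_floordiv_neg_eq_iff_of_pos (by omega)).mp rfl).2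
    have hbound : items.length ≤ n.toNat * cs.toNat := by
      have hqcs : (-(PySem.Int.floordiv (-(items.length : Int)) n)) ≤ cs := le_max_right _ _
      have hmul : (-(PySem.Int.floordiv (-(items.length : Int)) n)) * n ≤ cs * n :=
        mul_le_mul_of_nonneg_right hqcs (by omega)
      have hn0 : ((n.toNat : Int)) = n := Int.toNat_of_nonneg (by omega)
      have h3 : (items.length : Int) ≤ ((n.toNat * cs.toNat : Nat) : Int) := by
        push_cast [hc0, hn0]
        calc (items.length : Int) ≤ _ := hle
          _ ≤ cs * n := hmul
          _ = n * cs := by ring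
      exact_mod_cast h3
    rw [pv_fold_enum cs hcs1 items []]
    rw [PySem.List.pyRange_one]
    simp only [sub_zero, List.foldl_map, zero_add]
    have hA : (List.range n.toNat).foldl
        (fun acc k => if PySem.List.slice items (some ((k : Nat) * cs)) (some (((k : Nat) + 1) * cs)) ≠ [] then
            acc ++ [PySem.List.slice items (some ((k : Nat) * cs)) (some (((k : Nat) + 1) * cs))]
          else acc) []
        = (List.range n.toNat).foldl
        (fun acc k => if (items.drop (k * cs.toNat)).take cs.toNat ≠ [] then
            acc ++ [(items.drop (k * cs.toNat)).take cs.toNat] else acc) [] := by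
      congr 1
      funext a k
      have e1 : ((k : Nat) : Int) * cs = ((k * cs.toNat : Nat) : Int) := by
        push_cast [hc0]; ring
      have e2 : (((k : Nat) : Int) + 1) * cs = ((k * cs.toNat + cs.toNat : Nat) : Int) := by
        push_cast [hc0]; ring
      rw [e1, e2, PySem.List.slice_natCast]
      simp [Nat.add_sub_cancel_left]
    rw [hA, pv_fold_slices cs.toNat (by omega) n.toNat items [] hbound]
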